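-- pv_equiv track=rewrite | github.com/AndreiJulei/UBB-work | semester1/FundamentalsOfProgramming/a2-JuleiAndrei-main/assignments_2.py | strand
-- ===== SOURCE A (Python) =====
-- def strand(a: list):
--     if not a:
--         return []
--
--     sublist = []
--     sublist.append(a.pop(0))
--     element = 0
--
--     while element < len(a):
--         if sublist[-1] <= a[element]:
--             sublist.append(a.pop(element))
--         else:
--             element += 1
--
--     return sublist
-- ===== SOURCE B (Python) =====
-- def strand(a: list):
--     # Single left-to-right pass: keep every element >= the last kept one (O(n)).
--     # Like A, the kept elements are removed from the caller's list in place.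
--     if not a:
--         return []
--     kept = [a[0]]
--     last = a[0]
--     rest = []
--     for x in a[1:]:
--         if last <= x:
--             kept.append(x)
--             last = x
--         else:
--             rest.append(x)
--     a[:] = rest
--     return kept
-- ===== Notes on version B (the rewrite author's own statement) =====
-- stated objective: faster
-- what changed: Replaces the while-loop that repeatedly pops from the middle of the list (each pop shifts the tail) with one linear pass that partitions the list into the kept strand and the leftover, assigned back in place.
import Mathlib
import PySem

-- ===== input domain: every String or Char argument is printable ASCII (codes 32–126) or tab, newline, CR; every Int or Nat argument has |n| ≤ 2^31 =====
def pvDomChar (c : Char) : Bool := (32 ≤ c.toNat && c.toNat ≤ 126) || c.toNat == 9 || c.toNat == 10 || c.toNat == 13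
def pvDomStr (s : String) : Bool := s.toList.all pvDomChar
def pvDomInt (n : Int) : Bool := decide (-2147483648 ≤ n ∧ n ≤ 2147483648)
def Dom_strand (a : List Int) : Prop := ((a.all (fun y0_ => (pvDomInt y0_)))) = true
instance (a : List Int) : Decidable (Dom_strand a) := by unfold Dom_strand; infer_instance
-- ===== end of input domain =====

-- B replaces A's repeated mid-list pops with one linear pass; both mutate the
-- argument list the same way in Python, and the theorems below are about the
-- RETURN value (the ports take and return values only).

-- ===== PORT A =====
-- while element < len(a): if sublist[-1] <= a[element]: sublist.append(a.pop(element)) else element += 1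
-- a.pop(element) (0 ≤ element < len a) is ported exactly as the popped value a[element]
-- plus the remaining list a.eraseIdx element; sublist[-1] is sub.getLastD 0 (sub is never empty here).
def strandLoop (sub : List Int) (a : List Int) (element : Nat) : List Int :=
  if h : element < a.length then
    if sub.getLastD 0 ≤ a[element] then
      strandLoop (sub ++ [a[element]]) (a.eraseIdx element) element
    else
      strandLoop sub a (element + 1)
  else
    sub
termination_by a.length - element
decreasing_by
  · simp [List.length_eraseIdx, h]; omega
  · omega

def strand (a : List Int) : List Int :=
  match a with
  | [] => []                              -- if not a: return []
  | h :: t => strandLoop [h] t 0          -- sublist = [a.pop(0)]; element = 0; loop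

-- ===== PORT B =====
-- one pass over a[1:] with state (kept, last); the leftover list only affects the
-- in-place mutation, not the return value, so the port carries (kept, last).
def strand_alt (a : List Int) : List Int :=
  match a with
  | [] => []
  | first :: t =>
    (t.foldl (fun (st : List Int × Int) x =>
      if st.2 ≤ x then (st.1 ++ [x], x) else st) ([first], first)).1

-- ===== PRECONDITION & SPEC =====
def Spec_strand (a : List Int) (out : List Int) : Prop := out = strand_alt a
instance (a : List Int) (out : List Int) : Decidable (Spec_strand a out) := by unfold Spec_strand; infer_instance

-- ===== CLAIM (what is proved, stated in full; the proofs are below) =====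
def Claim_equal_strand : Prop := ∀ (a : List Int), Dom_strand a → Spec_strand a (strand a)

-- ===== LEMMAS AND PROOFS =====

-- canonical form of the kept strand starting after a kept element `last`
def goStrand (last : Int) : List Int → List Int
  | [] => []
  | x :: xs => if last ≤ x then x :: goStrand x xs else goStrand last xs

theorem foldl_eq_goStrand (t : List Int) (kept : List Int) (last : Int) :
    (t.foldl (fun (st : List Int × Int) x =>
      if st.2 ≤ x then (st.1 ++ [x], x) else st) (kept, last)).1
      = kept ++ goStrand last t := by
  induction t generalizing kept last with
  | nil => simp [goStrand]
  | cons x xs ih =>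
    simp only [List.foldl_cons, goStrand]
    by_cases h : last ≤ x
    · simp [h, ih]
    · simp [h, ih]

theorem strandLoop_eq (a : List Int) (element : Nat) (sub : List Int)
    (hle : element ≤ a.length) :
    strandLoop sub a element = sub ++ goStrand (sub.getLastD 0) (a.drop element) := by
  by_cases h : element < a.length
  · rw [strandLoop]
    rw [List.drop_eq_getElem_cons h]
    by_cases hc : sub.getLastD 0 ≤ a[element]
    · have hlen : element ≤ (a.eraseIdx element).length := by
        simp [List.length_eraseIdx, h]; omega
      rw [dif_pos h, if_pos hc, strandLoop_eq (a.eraseIdx element) element (sub ++ [a[element]]) hlen]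
      have hdrop : (a.eraseIdx element).drop element = a.drop (element + 1) := by
        rw [List.eraseIdx_eq_take_drop_succ]
        have hl : (a.take element).length = element := by
          simp [List.length_take]; omega
        nth_rewrite 1 [← hl]
        rw [List.drop_left]
      rw [hdrop]
      simp only [goStrand, List.getLastD_concat, if_pos hc, List.append_assoc,
        List.singleton_append]
    · rw [dif_pos h, if_neg hc, strandLoop_eq a (element + 1) sub (by omega)]
      simp only [goStrand]
      rw [if_neg hc]
  · have he : element = a.length := by omega
    rw [strandLoop]
    simp [he, goStrand]
termination_by a.length - element
decreasing_by
  all_goals first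
  | (simp [List.length_eraseIdx, h]; omega)
  | omega

-- ===== VERDICT (by name: the statement is the Claim_ definition above) =====
theorem strand_spec : Claim_equal_strand := by
  intro a _
  unfold Spec_strand
  cases a with
  | nil => rfl
  | cons h t =>
    simp only [strand, strand_alt]
    rw [strandLoop_eq t 0 [h] (by omega), foldl_eq_goStrand]
    simp [List.getLastD]
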